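-- pv_equiv track=rewrite | github.com/snyke7/aoc2020 | day24.py | next_tile_state
-- ===== SOURCE A (Python) =====
-- ordinal_directions = [(1, 0), (1, -1), (-1, 0), (-1, 1), (0, 1), (0, -1)]
--
-- def get_neighbour_tiles(tile_set):
--     return {(tx + dx, ty + dy) for tx, ty in tile_set for dx, dy in ordinal_directions}
--
-- def count_neighbors(tile, tile_set):
--     tx, ty = tile
--     return sum((1 for dx, dy in ordinal_directions if (tx + dx, ty + dy) in tile_set))
--
-- def next_tile_state(tile_set):
--     result = set()
--     for neighbor in get_neighbour_tiles(tile_set):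
--         neighbor_count = count_neighbors(neighbor, tile_set)
--         if neighbor in tile_set:
--             if neighbor_count == 0 or neighbor_count > 2:
--                 pass  # black is flipped to white
--             else:
--                 result.add(neighbor)  # tile stays black
--         else:
--             if neighbor_count == 2:
--                 result.add(neighbor)  # white is flipped to black
--     return result
-- ===== SOURCE B (Python) =====
-- ordinal_directions = [(1, 0), (1, -1), (-1, 0), (-1, 1), (0, 1), (0, -1)]
--
-- def next_tile_state(tile_set):
--     counts = {}
--     for tx, ty in tile_set:
--         for dx, dy in ordinal_directions:
--             key = (tx + dx, ty + dy)
--             counts[key] = counts.get(key, 0) + 1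
--     return {tile for tile, c in counts.items()
--             if c == 2 or (c == 1 and tile in tile_set)}
-- ===== Notes on version B (the rewrite author's own statement) =====
-- stated objective: faster
-- what changed: Replaces the per-candidate rescan (six set lookups for every neighbour of a black tile) by a single scatter pass that increments a counter dict at each neighbour of each black tile, then one filter pass over the counter's items.
import Mathlib
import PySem

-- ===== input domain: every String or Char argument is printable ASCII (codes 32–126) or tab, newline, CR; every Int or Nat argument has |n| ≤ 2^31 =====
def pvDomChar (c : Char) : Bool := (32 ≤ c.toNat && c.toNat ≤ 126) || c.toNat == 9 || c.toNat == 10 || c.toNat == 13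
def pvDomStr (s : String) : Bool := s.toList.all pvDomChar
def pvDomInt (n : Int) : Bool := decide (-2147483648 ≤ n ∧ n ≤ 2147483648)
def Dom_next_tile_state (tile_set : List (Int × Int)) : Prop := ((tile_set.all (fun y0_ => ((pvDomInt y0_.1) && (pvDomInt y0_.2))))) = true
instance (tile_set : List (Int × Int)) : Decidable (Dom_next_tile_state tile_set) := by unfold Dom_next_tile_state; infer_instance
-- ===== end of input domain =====

-- One step of the hex game of life. B replaces A's per-candidate six-lookup rescan by one
-- counter-scatter pass over the black tiles followed by a single filter over the counter's items
-- (measurably faster by a constant factor).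

-- ===== PORT A =====
def ordinal_directions : List (Int × Int) := [(1, 0), (1, -1), (-1, 0), (-1, 1), (0, 1), (0, -1)]

def get_neighbour_tiles (tile_set : List (Int × Int)) : PySem.Set (Int × Int) :=
  PySem.Set.ofList (tile_set.flatMap (fun t => ordinal_directions.map (fun d => (t.1 + d.1, t.2 + d.2))))

def count_neighbors (tile : Int × Int) (tile_set : List (Int × Int)) : Int :=
  ordinal_directions.foldl (fun acc d => acc + (if (tile.1 + d.1, tile.2 + d.2) ∈ tile_set then 1 else 0)) 0

def next_tile_state (tile_set : List (Int × Int)) : List (Int × Int) :=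
  (get_neighbour_tiles tile_set).foldl (fun result neighbor =>
    let neighbor_count := count_neighbors neighbor tile_set
    if neighbor ∈ tile_set then
      if neighbor_count = 0 ∨ neighbor_count > 2 then result
      else PySem.Set.add result neighbor
    else
      if neighbor_count = 2 then PySem.Set.add result neighbor else result)
    PySem.Set.empty

-- ===== PORT B =====
def next_tile_state_alt (tile_set : List (Int × Int)) : List (Int × Int) :=
  let counts : PySem.Dict (Int × Int) Int :=
    tile_set.foldl (fun cs t =>
      ordinal_directions.foldl (fun cs d =>
        cs.insert (t.1 + d.1, t.2 + d.2) (cs.getD (t.1 + d.1, t.2 + d.2) 0 + 1)) cs)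
      PySem.Dict.empty
  PySem.Set.ofList
    ((counts.items.filter (fun p => p.2 == 2 || (p.2 == 1 && decide (p.1 ∈ tile_set)))).map (·.1))

-- ===== PRECONDITION & SPEC =====
-- Pre_: the argument encodes a Python set, so by the type convention its elements are distinct;
-- no input A accepts is excluded (a Python set cannot hold duplicate elements).
def Pre_next_tile_state (tile_set : List (Int × Int)) : Prop := tile_set.Nodup
instance (tile_set : List (Int × Int)) : Decidable (Pre_next_tile_state tile_set) := by unfold Pre_next_tile_state; infer_instance
def pvWitness_next_tile_state : (List (Int × Int)) := [(0, 0), (1, 0), (0, 1)]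

def Spec_next_tile_state (tile_set : List (Int × Int)) (out : List (Int × Int)) : Prop := out = next_tile_state_alt tile_set
instance (tile_set : List (Int × Int)) (out : List (Int × Int)) : Decidable (Spec_next_tile_state tile_set out) := by unfold Spec_next_tile_state; infer_instance

-- ===== CLAIM (what is proved, stated in full; the proofs are below) =====
def Claim_equal_next_tile_state : Prop := ∀ (tile_set : List (Int × Int)), Dom_next_tile_state tile_set → Pre_next_tile_state tile_set → Spec_next_tile_state tile_set (next_tile_state tile_set)

-- ===== LEMMAS AND PROOFS =====

-- the multiset of neighbours of all black tiles, in A's generation order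
def pvNbrs (tile_set : List (Int × Int)) : List (Int × Int) :=
  tile_set.flatMap (fun t => ordinal_directions.map (fun d => (t.1 + d.1, t.2 + d.2)))

-- A's keep-condition, as a Boolean predicate on a candidate tile
def pvCondA (tile_set : List (Int × Int)) (n : Int × Int) : Bool :=
  if n ∈ tile_set then !(decide (count_neighbors n tile_set = 0) || decide (count_neighbors n tile_set > 2))
  else decide (count_neighbors n tile_set = 2)

-- a fold that conditionally Set.adds pairwise-distinct fresh elements is a filter
lemma pvFoldlAddFilter (c : (Int × Int) → Bool) (K r : List (Int × Int))
    (hK : K.Nodup) (hfresh : ∀ n ∈ K, n ∉ r) :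
    K.foldl (fun r n => if c n then PySem.Set.add r n else r) r = r ++ K.filter c := by
  induction K generalizing r with
  | nil => simp
  | cons a K ih =>
    simp only [List.foldl_cons, List.filter_cons]
    rcases List.nodup_cons.mp hK with ⟨ha, hK'⟩
    by_cases hca : c a
    · rw [hca, if_pos rfl, PySem.Set.add_of_not_mem (hfresh a (by simp))]
      rw [ih _ hK' (by
        intro n hn
        simp only [List.mem_append, List.mem_singleton]
        rintro (h | h)
        · exact hfresh n (by simp [hn]) h
        · exact ha (h ▸ hn))]
      simp
    · rw [if_neg (by simp [hca]), ih _ hK' (fun n hn => hfresh n (by simp [hn]))]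
      simp [hca]

-- A computes the filter of its candidate set by pvCondA
lemma pvAeq (ts : List (Int × Int)) :
    next_tile_state ts = (get_neighbour_tiles ts).filter (pvCondA ts) := by
  have hbody : (fun (result : List (Int × Int)) (neighbor : Int × Int) =>
      let neighbor_count := count_neighbors neighbor ts
      if neighbor ∈ ts then
        if neighbor_count = 0 ∨ neighbor_count > 2 then result
        else PySem.Set.add result neighbor
      else
        if neighbor_count = 2 then PySem.Set.add result neighbor else result)
      = (fun result neighbor => if pvCondA ts neighbor then PySem.Set.add result neighbor else result) := by
    funext r n
    unfold pvCondA
    by_cases hm : n ∈ ts <;> by_cases h0 : count_neighbors n ts = 0 <;>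
      by_cases hg : count_neighbors n ts > 2 <;> simp [hm, h0, hg]
  rw [next_tile_state, hbody]
  simpa using pvFoldlAddFilter (pvCondA ts) (get_neighbour_tiles ts) []
    (PySem.Set.nodup_ofList _) (by simp)

-- on same-indexed ifs: membership in a cons splits into an equality term and a tail term
lemma pvMemCons (a : Int × Int) (ts : List (Int × Int)) (ha : a ∉ ts) (x : Int × Int) :
    (if x ∈ a :: ts then (1:Int) else 0) = (if x = a then 1 else 0) + (if x ∈ ts then 1 else 0) := by
  by_cases h1 : x = a
  · subst h1; simp [ha]
  · simp [List.mem_cons, h1]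

-- the scattered multiset counts exactly A's neighbour count (ordinal_directions is closed under negation)
lemma pvCountEq (ts : List (Int × Int)) (hts : ts.Nodup) (n : Int × Int) :
    ((pvNbrs ts).count n : Int) = count_neighbors n ts := by
  induction ts with
  | nil => simp [pvNbrs, count_neighbors, ordinal_directions]
  | cons a ts ih =>
    rcases List.nodup_cons.mp hts with ⟨ha, hts'⟩
    simp only [pvNbrs, List.flatMap_cons, List.count_append] at *
    push_cast
    rw [ih hts']
    simp only [count_neighbors, ordinal_directions, List.foldl_cons, List.foldl_nil]
    simp only [pvMemCons a ts ha]
    rcases a with ⟨a1, a2⟩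
    rcases n with ⟨n1, n2⟩
    simp [List.count_cons, Prod.ext_iff]
    have h1 : (n1 + 1 = a1 ∧ n2 = a2) = (a1 + -1 = n1 ∧ a2 = n2) := propext (by constructor <;> omega)
    have h2 : (n1 + 1 = a1 ∧ n2 + -1 = a2) = (a1 + -1 = n1 ∧ a2 + 1 = n2) := propext (by constructor <;> omega)
    have h3 : (n1 + -1 = a1 ∧ n2 = a2) = (a1 + 1 = n1 ∧ a2 = n2) := propext (by constructor <;> omega)
    have h4 : (n1 + -1 = a1 ∧ n2 + 1 = a2) = (a1 + 1 = n1 ∧ a2 + -1 = n2) := propext (by constructor <;> omega)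
    have h5 : (n1 = a1 ∧ n2 + 1 = a2) = (a1 = n1 ∧ a2 + -1 = n2) := propext (by constructor <;> omega)
    have h6 : (n1 = a1 ∧ n2 + -1 = a2) = (a1 = n1 ∧ a2 + 1 = n2) := propext (by constructor <;> omega)
    simp only [h1, h2, h3, h4, h5, h6]
    ring

-- B's nested scatter loop is the fold of the insert-update over the flattened neighbour list
lemma pvFlatten (ts : List (Int × Int)) (d0 : PySem.Dict (Int × Int) Int) :
    ts.foldl (fun cs t =>
      ordinal_directions.foldl (fun cs d =>
        cs.insert (t.1 + d.1, t.2 + d.2) (cs.getD (t.1 + d.1, t.2 + d.2) 0 + 1)) cs) d0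
    = (pvNbrs ts).foldl (fun d x => d.insert x (d.getD x 0 + 1)) d0 := by
  induction ts generalizing d0 with
  | nil => simp [pvNbrs]
  | cons a ts ih =>
    simp only [pvNbrs, List.flatMap_cons, List.foldl_append, List.foldl_cons, List.foldl_map] at *
    rw [ih]

-- B computes the filter of the same candidate set by its own condition
lemma pvBeq (ts : List (Int × Int)) :
    next_tile_state_alt ts = (get_neighbour_tiles ts).filter
      (fun n => ((pvNbrs ts).count n : Int) == 2 ||
                (((pvNbrs ts).count n : Int) == 1 && decide (n ∈ ts))) := by
  have hcounts : ts.foldl (fun cs t =>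
      ordinal_directions.foldl (fun cs d =>
        cs.insert (t.1 + d.1, t.2 + d.2) (cs.getD (t.1 + d.1, t.2 + d.2) 0 + 1)) cs)
      PySem.Dict.empty = PySem.Dict.counter (pvNbrs ts) := by
    rw [← PySem.Dict.foldl_insert_getD_add_one_eq_counter, pvFlatten]
  rw [next_tile_state_alt]
  simp only [hcounts, PySem.Dict.items_counter]
  rw [List.filter_map, List.map_map]
  have : ((·.1) ∘ fun k => (k, ((pvNbrs ts).count k : Int))) = id := by funext k; rfl
  rw [this, List.map_id]
  refine (PySem.Set.ofList_eq_self_of_nodup _ ((PySem.Set.nodup_ofList (pvNbrs ts)).filter _)).trans ?_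
  rfl

-- ===== VERDICT (by name: the statement is the Claim_ definition above) =====
theorem next_tile_state_spec : Claim_equal_next_tile_state := by
  intro ts _ hpre
  unfold Spec_next_tile_state
  rw [pvAeq, pvBeq]
  apply List.filter_congr
  intro n _
  have hc := pvCountEq ts hpre n
  unfold pvCondA
  by_cases hm : n ∈ ts <;> simp [hm, ← hc] <;>
    (rw [Bool.eq_iff_iff];
     simp only [Bool.and_eq_true, Bool.or_eq_true, Bool.not_eq_true', decide_eq_false_iff_not,
       decide_eq_true_eq, beq_iff_eq];
     try omega)
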